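-- pv_equiv track=rewrite | github.com/jmshoun/braintree | fit.py | split_trees
-- ===== SOURCE A (Python) =====
-- def split_trees(tree_lines):
--     trees = []
--     current_tree = []
--     for line in tree_lines[1:]:
--         if line.find("booster") == 0:
--             trees.append(current_tree)
--             current_tree = []
--         else:
--             current_tree.append(line)
--     trees.append(current_tree)
--     return trees
-- ===== SOURCE B (Python) =====
-- def split_trees(tree_lines):
--     lines = tree_lines[1:]
--     boosters = [i for i, line in enumerate(lines) if line.find("booster") == 0]
--     trees = []
--     start = 0
--     for bi in boosters:
--         trees.append(lines[start:bi])
--         start = bi + 1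
--     trees.append(lines[start:])
--     return trees
-- ===== Notes on version B (the rewrite author's own statement) =====
-- stated objective: alternative
-- what changed: Instead of A's single-pass append/flush accumulator, B first builds the index table of booster-marker lines and then produces the groups by slicing between consecutive marker indices.
import Mathlib
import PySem

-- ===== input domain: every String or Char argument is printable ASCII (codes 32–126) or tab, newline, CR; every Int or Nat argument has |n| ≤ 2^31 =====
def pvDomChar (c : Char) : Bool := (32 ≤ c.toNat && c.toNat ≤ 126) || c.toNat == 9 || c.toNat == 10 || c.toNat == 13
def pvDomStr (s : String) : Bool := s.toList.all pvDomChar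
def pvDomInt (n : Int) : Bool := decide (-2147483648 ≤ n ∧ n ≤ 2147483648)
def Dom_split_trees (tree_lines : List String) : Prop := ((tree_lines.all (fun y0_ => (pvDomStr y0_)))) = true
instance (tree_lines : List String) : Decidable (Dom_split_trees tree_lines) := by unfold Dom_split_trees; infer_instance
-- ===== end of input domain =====

-- B replaces A's append/flush accumulator loop by first building the index table of
-- booster-marker lines and then slicing between consecutive marker indices (objective: alternative).

-- ===== PORT A =====
def split_trees (tree_lines : List String) : List (List String) :=
  match (PySem.List.slice tree_lines (some 1) none).foldl
      (fun (st : List (List String) × List String) line =>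
        if PySem.Str.find line "booster" == 0 then (st.1 ++ [st.2], ([] : List String))
        else (st.1, st.2 ++ [line])) ([], []) with
  | (trees, current_tree) => trees ++ [current_tree]

-- ===== PORT B =====
def split_trees_alt (tree_lines : List String) : List (List String) :=
  let lines := PySem.List.slice tree_lines (some 1) none
  let boosters := ((PySem.List.enumerate lines).filter
      (fun p => PySem.Str.find p.2 "booster" == 0)).map Prod.fst
  match boosters.foldl
      (fun (st : List (List String) × Int) bi =>
        (st.1 ++ [PySem.List.slice lines (some st.2) (some bi)], bi + 1)) ([], 0) with
  | (trees, start) => trees ++ [PySem.List.slice lines (some start) none]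

-- ===== PRECONDITION & SPEC =====
def Spec_split_trees (tree_lines : List String) (out : List (List String)) : Prop := out = split_trees_alt tree_lines
instance (tree_lines : List String) (out : List (List String)) : Decidable (Spec_split_trees tree_lines out) := by unfold Spec_split_trees; infer_instance

-- ===== CLAIM (what is proved, stated in full; the proofs are below) =====
def Claim_equal_split_trees : Prop := ∀ (tree_lines : List String), Dom_split_trees tree_lines → Spec_split_trees tree_lines (split_trees tree_lines)

-- ===== LEMMAS AND PROOFS =====

-- Proof-only reference function: structural recursion computing the groups of a line list.
def goB : List String → List (List String)
  | [] => [[]]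
  | head :: rest =>
    if PySem.Str.find head "booster" == 0 then [] :: goB rest
    else (head :: (goB rest).headD []) :: (goB rest).tail

theorem goB_ne_nil (l : List String) : goB l ≠ [] := by
  cases l with
  | nil => simp [goB]
  | cons h t => unfold goB; split <;> simp

theorem goB_eq_headD_cons (l : List String) :
    goB l = (goB l).headD [] :: (goB l).tail := by
  cases hl : goB l with
  | nil => exact absurd hl (goB_ne_nil l)
  | cons a b => simp

-- ---- A-side: the accumulator fold computes goB ----

theorem foldl_goB (lines : List String) (acc : List (List String)) (cur : List String) :
    (lines.foldl
        (fun (st : List (List String) × List String) line =>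
          if PySem.Str.find line "booster" == 0 then (st.1 ++ [st.2], ([] : List String))
          else (st.1, st.2 ++ [line])) (acc, cur)).1 ++
      [(lines.foldl
        (fun (st : List (List String) × List String) line =>
          if PySem.Str.find line "booster" == 0 then (st.1 ++ [st.2], ([] : List String))
          else (st.1, st.2 ++ [line])) (acc, cur)).2]
    = acc ++ (cur ++ (goB lines).headD []) :: (goB lines).tail := by
  induction lines generalizing acc cur with
  | nil => simp [goB]
  | cons h t ih =>
    obtain ⟨g0, gs, hg⟩ : ∃ g0 gs, goB t = g0 :: gs := by
      cases h' : goB t with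
      | nil => exact absurd h' (goB_ne_nil t)
      | cons a b => exact ⟨a, b, rfl⟩
    simp only [List.foldl_cons, goB]
    by_cases hb : (PySem.Str.find h "booster" == 0) = true
    · simp only [if_pos hb]
      rw [ih, hg]
      simp
    · simp only [if_neg hb]
      rw [ih, hg]
      simp

theorem split_trees_eq_goB (tree_lines : List String) :
    split_trees tree_lines = goB (PySem.List.slice tree_lines (some 1) none) := by
  show (_ : List (List String)) ++ _ = _
  rw [foldl_goB]
  simpa using (goB_eq_headD_cons (PySem.List.slice tree_lines (some 1) none)).symm

-- ---- B-side: the index-table-and-slice fold computes goB ----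

-- booster indices of `lines`, enumerated from `s`
def bEnum (lines : List String) (s : Int) : List Int :=
  ((PySem.List.enumerate lines s).filter
      (fun p => PySem.Str.find p.2 "booster" == 0)).map Prod.fst

-- B's fold, generalized over the accumulator and the running start index
def finB (xs : List String) (bs : List Int) (acc : List (List String)) (start : Int) :
    List (List String) :=
  match bs.foldl
      (fun (st : List (List String) × Int) bi =>
        (st.1 ++ [PySem.List.slice xs (some st.2) (some bi)], bi + 1)) (acc, start) with
  | (trees, st) => trees ++ [PySem.List.slice xs (some st) none]

theorem bEnum_nil (s : Int) : bEnum [] s = [] := rfl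

theorem bEnum_cons (h : String) (t : List String) (s : Int) :
    bEnum (h :: t) s =
      if PySem.Str.find h "booster" == 0 then s :: bEnum t (s + 1) else bEnum t (s + 1) := by
  simp only [bEnum, PySem.List.enumerate_cons, List.filter_cons]
  split <;> simp_all

theorem finB_nil (xs : List String) (acc : List (List String)) (start : Int) :
    finB xs [] acc start = acc ++ [PySem.List.slice xs (some start) none] := rfl

theorem finB_cons (xs : List String) (b : Int) (bs : List Int) (acc : List (List String))
    (start : Int) :
    finB xs (b :: bs) acc start =
      finB xs bs (acc ++ [PySem.List.slice xs (some start) (some b)]) (b + 1) := rfl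

theorem finB_goB (lines : List String) (xs : List String) (s p : Nat)
    (acc : List (List String)) (hps : p ≤ s) (hdrop : xs.drop s = lines) :
    finB xs (bEnum lines (s : Int)) acc (p : Int)
      = acc ++ ((xs.drop p).take (s - p) ++ (goB lines).headD []) :: (goB lines).tail := by
  induction lines generalizing s p acc with
  | nil =>
    rw [bEnum_nil, finB_nil, PySem.List.slice_from_natCast]
    have hlen : xs.length ≤ s := by
      have := congrArg List.length hdrop
      simp at this; omega
    have : (xs.drop p).take (s - p) = xs.drop p :=
      List.take_of_length_le (by simp; omega)
    simp [goB, this]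
  | cons h t ih =>
    have hdrop' : xs.drop (s + 1) = t := by
      rw [← List.drop_drop]
      simp [hdrop]
    obtain ⟨g0, gs, hg⟩ : ∃ g0 gs, goB t = g0 :: gs := by
      cases h' : goB t with
      | nil => exact absurd h' (goB_ne_nil t)
      | cons a b => exact ⟨a, b, rfl⟩
    have hxs : xs[s]? = some h := by
      have : (xs.drop s)[0]? = some h := by rw [hdrop]; rfl
      simpa using this
    rw [bEnum_cons]
    by_cases hb : (PySem.Str.find h "booster" == 0) = true
    · rw [if_pos hb, finB_cons, PySem.List.slice_natCast]
      have h1 : ((s : Int) + 1) = ((s + 1 : Nat) : Int) := by push_cast; ring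
      rw [h1, ih (s + 1) (s + 1) _ (le_refl _) hdrop']
      simp only [goB, if_pos hb, hg]
      simp
    · rw [if_neg hb]
      have h1 : ((s : Int) + 1) = ((s + 1 : Nat) : Int) := by push_cast; ring
      rw [h1, ih (s + 1) p _ (by omega) hdrop']
      have hslice : (xs.drop p).take (s + 1 - p) = (xs.drop p).take (s - p) ++ [h] := by
        have hsub : s + 1 - p = (s - p) + 1 := by omega
        rw [hsub, List.take_add_one]
        have : (xs.drop p)[s - p]? = some h := by
          rw [List.getElem?_drop]
          have : p + (s - p) = s := by omega
          rw [this]; exact hxs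
        simp [this]
      simp only [goB, if_neg hb, hg, hslice]
      simp

theorem split_trees_alt_eq_goB (tree_lines : List String) :
    split_trees_alt tree_lines = goB (PySem.List.slice tree_lines (some 1) none) := by
  have h0 : split_trees_alt tree_lines
      = finB (PySem.List.slice tree_lines (some 1) none)
          (bEnum (PySem.List.slice tree_lines (some 1) none) ((0 : Nat) : Int)) [] ((0 : Nat) : Int) := rfl
  rw [h0, finB_goB _ _ 0 0 [] (le_refl _) (by simp)]
  simpa using (goB_eq_headD_cons (PySem.List.slice tree_lines (some 1) none)).symm

-- ===== VERDICT (by name: the statement is the Claim_ definition above) =====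
theorem split_trees_spec : Claim_equal_split_trees := by
  intro tree_lines _
  show _ = _
  rw [split_trees_eq_goB, split_trees_alt_eq_goB]
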